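-- pv_equiv track=rewrite | github.com/mohammedjasam/Google-Code-Jam | 2018/alien_attack.py | calcDamage
-- ===== SOURCE A (Python) =====
-- def calcDamage(s):
--     strength = 1
--     total_damage = 0
--     for i in s:
--         if i == 'C':
--             strength = strength * 2
--         elif i == 'S':
--             total_damage = total_damage + strength
--     return strength, total_damage
-- ===== SOURCE B (Python) =====
-- def calcDamage(s):
--     # Group-based: split on 'C' into segments; each 'S' in segment k deals 2**k damage.
--     parts = s.split('C')
--     total_damage = sum(p.count('S') * 2 ** k for k, p in enumerate(parts))
--     return 2 ** (len(parts) - 1), total_damage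
-- ===== Notes on version B (the rewrite author's own statement) =====
-- stated objective: faster
-- what changed: Instead of a per-character loop carrying a running strength, B splits the string at the doubling character into segments and computes a weighted S-count per segment (weight 2^k for segment k), with final strength 2^(number of segments - 1); the scanning moves into C-level str.split/str.count.
import Mathlib
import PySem

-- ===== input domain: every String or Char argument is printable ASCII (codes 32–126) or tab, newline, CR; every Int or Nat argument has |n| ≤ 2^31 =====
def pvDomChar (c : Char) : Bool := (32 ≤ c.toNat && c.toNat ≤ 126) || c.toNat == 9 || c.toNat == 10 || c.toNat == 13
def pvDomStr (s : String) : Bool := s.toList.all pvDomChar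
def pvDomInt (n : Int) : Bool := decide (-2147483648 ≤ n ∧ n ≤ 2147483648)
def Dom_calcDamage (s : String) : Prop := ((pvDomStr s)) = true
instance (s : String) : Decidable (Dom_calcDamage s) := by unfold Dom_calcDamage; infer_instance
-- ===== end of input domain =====

-- B replaces A's per-character running-strength loop by splitting on 'C' and taking a
-- weighted S-count per segment (same O(n) cost; measured constant-factor faster in Python).


-- ===== PORT A =====
-- for i in s: if i=='C': strength*=2 elif i=='S': total += strength
def calcDamage (s : String) : Int × Int :=
  s.toList.foldl (fun acc i =>
    if i = 'C' then (acc.1 * 2, acc.2)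
    else if i = 'S' then (acc.1, acc.2 + acc.1)
    else acc) ((1 : Int), (0 : Int))

-- ===== PORT B =====
-- parts = s.split('C'); total = sum(p.count('S') * 2**k for k, p in enumerate(parts));
-- return 2**(len(parts)-1), total     (2^k over a nonnegative Int index k is 2 ^ k.toNat)
def calcDamage_alt (s : String) : Int × Int :=
  let parts := PySem.Chars.splitOn s.toList ['C']
  let total_damage := ((PySem.List.enumerate parts 0).map
      (fun kp => (PySem.Chars.count kp.2 ['S'] : Int) * 2 ^ kp.1.toNat)).sum
  (2 ^ (parts.length - 1), total_damage)

-- ===== PRECONDITION & SPEC =====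
def Spec_calcDamage (s : String) (out : Int × Int) : Prop := out = calcDamage_alt s
instance (s : String) (out : Int × Int) : Decidable (Spec_calcDamage s out) := by unfold Spec_calcDamage; infer_instance

-- ===== CLAIM (what is proved, stated in full; the proofs are below) =====
def Claim_equal_calcDamage : Prop := ∀ (s : String), Dom_calcDamage s → Spec_calcDamage s (calcDamage s)

-- ===== LEMMAS AND PROOFS =====

-- reference splitter: Python's s.split('C') as direct structural recursion
def pvSplit : List Char → List Char → List (List Char)
  | cur, [] => [cur]
  | cur, c :: t => if c = 'C' then cur :: pvSplit [] t else pvSplit (cur ++ [c]) t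

-- weighted S-count of a segment list: W (p :: ps) = #S(p) + 2 * W ps
def pvW : List (List Char) → Int
  | [] => 0
  | p :: ps => (p.count 'S' : Int) + 2 * pvW ps

-- weighted S-count read directly off the string
def pvWl : List Char → Int
  | [] => 0
  | c :: t => if c = 'C' then 2 * pvWl t else if c = 'S' then 1 + pvWl t else pvWl t

theorem countGo_eq (l : List Char) : ∀ (fuel acc : Nat), l.length ≤ fuel →
    PySem.Chars.count.go ['S'] fuel l acc = acc + l.count 'S' := by
  induction l with
  | nil => intro fuel acc _; cases fuel <;> rw [PySem.Chars.count.go] <;> simp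
  | cons c t ih =>
    intro fuel acc h
    cases fuel with
    | zero => simp at h
    | succ n =>
      rw [PySem.Chars.count.go]
      by_cases hc : c = 'S'
      · subst hc
        rw [if_pos (by simp [List.isPrefixOf])]
        rw [show List.drop (['S'] : List Char).length ('S' :: t) = t from rfl]
        rw [ih n (acc + 1) (by simpa using h)]
        simp [List.count_cons]
        omega
      · have hcond : List.isPrefixOf ['S'] (c :: t) = false := by
          simp [List.isPrefixOf]; exact fun e => hc e.symm
        rw [hcond]
        simp only [Bool.false_eq_true, if_false]
        rw [ih n acc (by simpa using h)]
        simp [List.count_cons, hc]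

theorem count_eq_countS (p : List Char) :
    PySem.Chars.count p ['S'] = p.count 'S' := by
  rw [PySem.Chars.count]
  simp [countGo_eq p p.length 0 le_rfl]

theorem splitGo_eq (l : List Char) : ∀ (fuel : Nat) (cur : List Char)
    (acc : List (List Char)), l.length < fuel →
    PySem.Chars.splitOn.go ['C'] fuel l cur acc = acc.reverse ++ pvSplit cur.reverse l := by
  induction l with
  | nil =>
    intro fuel cur acc h
    cases fuel with
    | zero => simp at h
    | succ n =>
      rw [PySem.Chars.splitOn.go]
      all_goals simp [pvSplit]
  | cons c t ih =>
    intro fuel cur acc h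
    cases fuel with
    | zero => simp at h
    | succ n =>
      rw [PySem.Chars.splitOn.go]
      by_cases hc : c = 'C'
      · subst hc
        simp only [List.isPrefixOf, BEq.rfl, Bool.true_and, if_pos, List.length_cons,
          List.length_nil, List.drop_succ_cons, List.drop_zero, Nat.zero_add]
        rw [ih n [] (cur.reverse :: acc) (by simpa using h)]
        simp [pvSplit]
      · have hcond : List.isPrefixOf ['C'] (c :: t) = false := by
          simp [List.isPrefixOf]; exact fun e => hc e.symm
        rw [hcond]
        simp only [Bool.false_eq_true, if_false]
        rw [ih n (c :: cur) acc (by simpa using h)]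
        simp [pvSplit, hc]

theorem splitOn_eq (l : List Char) : PySem.Chars.splitOn l ['C'] = pvSplit [] l := by
  rw [PySem.Chars.splitOn, splitGo_eq l (l.length + 1) [] [] (by omega)]
  simp

theorem pvW_pvSplit (l : List Char) : ∀ cur : List Char,
    pvW (pvSplit cur l) = (cur.count 'S' : Int) + pvWl l := by
  induction l with
  | nil => intro cur; simp [pvSplit, pvW, pvWl]
  | cons c t ih =>
    intro cur
    by_cases hc : c = 'C'
    · subst hc
      have h1 : pvSplit cur ('C' :: t) = cur :: pvSplit [] t := by simp [pvSplit]
      rw [h1]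
      simp only [pvW, ih []]
      simp [pvWl]
    · by_cases hs : c = 'S'
      · subst hs
        have h1 : pvSplit cur ('S' :: t) = pvSplit (cur ++ ['S']) t := by simp [pvSplit, hc]
        rw [h1, ih (cur ++ ['S'])]
        simp [pvWl, hc, List.count_append]
        push_cast
        ring
      · have h1 : pvSplit cur (c :: t) = pvSplit (cur ++ [c]) t := by simp [pvSplit, hc]
        rw [h1, ih (cur ++ [c])]
        simp [pvWl, hc, hs, List.count_append]

theorem length_pvSplit (l : List Char) : ∀ cur : List Char,
    (pvSplit cur l).length = l.count 'C' + 1 := by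
  induction l with
  | nil => intro cur; simp [pvSplit]
  | cons c t ih =>
    intro cur
    by_cases hc : c = 'C'
    · subst hc; simp [pvSplit, ih]
    · simp [pvSplit, hc, ih]

theorem enum_sum (ps : List (List Char)) : ∀ n : Nat,
    ((PySem.List.enumerate ps (n : Int)).map
      (fun kp => (PySem.Chars.count kp.2 ['S'] : Int) * 2 ^ kp.1.toNat)).sum
      = 2 ^ n * pvW ps := by
  induction ps with
  | nil => intro n; simp [PySem.List.enumerate_nil, pvW]
  | cons p ps ih =>
    intro n
    rw [PySem.List.enumerate_cons, List.map_cons, List.sum_cons,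
      show (n : Int) + 1 = ((n + 1 : Nat) : Int) by push_cast; ring,
      ih (n + 1), count_eq_countS]
    simp only [pvW, Int.toNat_natCast, pow_succ]
    ring

theorem enum_sum_zero (ps : List (List Char)) :
    ((PySem.List.enumerate ps 0).map
      (fun kp => (PySem.Chars.count kp.2 ['S'] : Int) * 2 ^ kp.1.toNat)).sum = pvW ps := by
  simpa using enum_sum ps 0

theorem foldA_eq (l : List Char) : ∀ st td : Int,
    l.foldl (fun acc i =>
      if i = 'C' then (acc.1 * 2, acc.2)
      else if i = 'S' then (acc.1, acc.2 + acc.1)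
      else acc) (st, td) = (st * 2 ^ (l.count 'C'), td + st * pvWl l) := by
  induction l with
  | nil => intro st td; simp [pvWl]
  | cons c t ih =>
    intro st td
    by_cases hc : c = 'C'
    · subst hc
      simp [List.foldl_cons, ih, List.count_cons, pvWl]
      constructor <;> ring
    · by_cases hs : c = 'S'
      · subst hs
        simp [List.foldl_cons, hc, ih, pvWl]
        ring
      · simp [List.foldl_cons, hc, hs, ih, pvWl]

-- ===== VERDICT (by name: the statement is the Claim_ definition above) =====
theorem calcDamage_spec : Claim_equal_calcDamage := by
  intro s _
  unfold Spec_calcDamage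
  simp only [calcDamage, calcDamage_alt]
  rw [foldA_eq, splitOn_eq, enum_sum_zero, pvW_pvSplit s.toList [], length_pvSplit s.toList []]
  simp
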